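-- pv_equiv track=rewrite | github.com/tommsko/BAT2 | src/signatures/signature_generators/fasta.py | _split_residue_indices_methionine
-- ===== SOURCE A (Python) =====
-- def _split_residue_indices_methionine(
--     residues: dict[int, str]
-- ) -> tuple[set[int], set[int]]:
--     """
--     Splits residues' indices to two groups, methionine and non-methionine ones
--     :param residues: result from _fragment_extract_residues(...)
--     :return: set of methionine indices, set of non-methionine indices
--     """
--     is_methionine: set[int] = set()
--     not_methionine: set[int] = set()
--
--     for residue_id, residue_code in residues.items():
--         if residue_code == "M":
--             is_methionine.add(residue_id)
--         else:
--             not_methionine.add(residue_id)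
--     return is_methionine, not_methionine
-- ===== SOURCE B (Python) =====
-- def _split_residue_indices_methionine(
--     residues: dict[int, str]
-- ) -> tuple[set[int], set[int]]:
--     def go(items):
--         if len(items) == 0:
--             return set(), set()
--         if len(items) == 1:
--             rid, code = items[0]
--             return ({rid}, set()) if code == "M" else (set(), {rid})
--         mid = len(items) // 2
--         m1, n1 = go(items[:mid])
--         m2, n2 = go(items[mid:])
--         return m1 | m2, n1 | n2
--     return go(list(residues.items()))
-- ===== Notes on version B (the rewrite author's own statement) =====
-- stated objective: alternative
-- what changed: Replaces A's single left-to-right loop that conditionally adds each index to one of two accumulated sets by a divide-and-conquer recursion: split the item list in halves, partition each half recursively, and combine with set unions.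
import Mathlib
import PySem

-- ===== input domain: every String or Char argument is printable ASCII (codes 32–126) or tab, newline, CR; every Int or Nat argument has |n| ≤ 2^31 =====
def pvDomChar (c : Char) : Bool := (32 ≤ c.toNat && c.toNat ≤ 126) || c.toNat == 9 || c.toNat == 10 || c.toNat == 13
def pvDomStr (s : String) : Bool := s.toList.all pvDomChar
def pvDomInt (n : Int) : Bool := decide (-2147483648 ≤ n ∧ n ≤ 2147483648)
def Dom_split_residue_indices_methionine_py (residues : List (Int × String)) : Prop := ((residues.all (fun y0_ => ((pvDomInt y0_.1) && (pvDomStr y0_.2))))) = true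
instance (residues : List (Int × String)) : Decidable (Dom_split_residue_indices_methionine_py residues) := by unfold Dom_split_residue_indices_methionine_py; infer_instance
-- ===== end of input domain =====

-- B partitions by divide-and-conquer (split the item list in halves, recurse, combine the
-- half-results with set unions) instead of A's single left-to-right conditional loop.

-- ===== PORT A =====
def split_residue_indices_methionine_py (residues : List (Int × String)) : List Int × List Int :=
  residues.foldl
    (fun st p =>
      if p.2 = "M" then (PySem.Set.add st.1 p.1, st.2)
      else (st.1, PySem.Set.add st.2 p.1))
    (PySem.Set.empty, PySem.Set.empty)

-- ===== PORT B =====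
-- items[:mid] / items[mid:] with 0 ≤ mid ≤ len(items) are exactly List.take / List.drop
-- (PySem.List.slice_to / slice_from).
def pvGo : List (Int × String) → List Int × List Int
  | [] => (PySem.Set.empty, PySem.Set.empty)
  | [p] =>
      if p.2 = "M" then (PySem.Set.ofList [p.1], PySem.Set.empty)
      else (PySem.Set.empty, PySem.Set.ofList [p.1])
  | p :: q :: t =>
      let r1 := pvGo ((p :: q :: t).take ((p :: q :: t).length / 2))
      let r2 := pvGo ((p :: q :: t).drop ((p :: q :: t).length / 2))
      (PySem.Set.union r1.1 r2.1, PySem.Set.union r1.2 r2.2)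
termination_by l => l.length
decreasing_by
  · simp [List.length_take]; omega
  · simp; omega

def split_residue_indices_methionine_py_alt (residues : List (Int × String)) : List Int × List Int :=
  pvGo residues

-- ===== PRECONDITION & SPEC =====
-- Pre_ requires distinct keys: the parameter is a Python dict, so an association list
-- with a duplicated key does not represent any input the Python function can receive.
def Pre_split_residue_indices_methionine_py (residues : List (Int × String)) : Prop :=
  (residues.map (fun p => p.1)).Nodup
instance (residues : List (Int × String)) : Decidable (Pre_split_residue_indices_methionine_py residues) := by unfold Pre_split_residue_indices_methionine_py; infer_instance

def pvWitness_split_residue_indices_methionine_py : (List (Int × String)) := [(1, "M"), (2, "x"), (3, "M")]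

def Spec_split_residue_indices_methionine_py (residues : List (Int × String)) (out : List Int × List Int) : Prop := out = split_residue_indices_methionine_py_alt residues
instance (residues : List (Int × String)) (out : List Int × List Int) : Decidable (Spec_split_residue_indices_methionine_py residues out) := by unfold Spec_split_residue_indices_methionine_py; infer_instance

-- ===== CLAIM (what is proved, stated in full; the proofs are below) =====
def Claim_equal_split_residue_indices_methionine_py : Prop := ∀ (residues : List (Int × String)), Dom_split_residue_indices_methionine_py residues → Pre_split_residue_indices_methionine_py residues → Spec_split_residue_indices_methionine_py residues (split_residue_indices_methionine_py residues)

-- ===== LEMMAS AND PROOFS =====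

-- The methionine / non-methionine key lists, in iteration order.
def pvM (residues : List (Int × String)) : List Int :=
  (residues.filter (fun p => p.2 = "M")).map (fun p => p.1)
def pvN (residues : List (Int × String)) : List Int :=
  (residues.filter (fun p => ¬ p.2 = "M")).map (fun p => p.1)

-- A's fold, with generalized accumulators disjoint from the remaining keys.
theorem foldA_eq (l : List (Int × String)) (im nm : List Int)
    (hk : (l.map (fun p => p.1)).Nodup)
    (him : ∀ p ∈ l, p.1 ∉ im) (hnm : ∀ p ∈ l, p.1 ∉ nm) :
    l.foldl
      (fun st p =>
        if p.2 = "M" then (PySem.Set.add st.1 p.1, st.2)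
        else (st.1, PySem.Set.add st.2 p.1))
      (im, nm) = (im ++ pvM l, nm ++ pvN l) := by
  induction l generalizing im nm with
  | nil => simp [pvM, pvN]
  | cons p t ih =>
    simp only [List.map_cons, List.nodup_cons] at hk
    have hpt : ∀ q ∈ t, q.1 ≠ p.1 := by
      intro q hq h
      exact hk.1 (h ▸ List.mem_map_of_mem hq)
    by_cases hM : p.2 = "M"
    · simp only [List.foldl_cons]
      rw [if_pos hM, PySem.Set.add_of_not_mem (him p (by simp))]
      rw [ih (im ++ [p.1]) nm hk.2
        (fun q hq => by
          simp only [List.mem_append, List.mem_singleton]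
          rintro (h | h)
          · exact him q (List.mem_cons_of_mem _ hq) h
          · exact hpt q hq h)
        (fun q hq => hnm q (List.mem_cons_of_mem _ hq))]
      simp [pvM, pvN, hM]
    · simp only [List.foldl_cons]
      rw [if_neg hM, PySem.Set.add_of_not_mem (hnm p (by simp))]
      rw [ih im (nm ++ [p.1]) hk.2
        (fun q hq => him q (List.mem_cons_of_mem _ hq))
        (fun q hq => by
          simp only [List.mem_append, List.mem_singleton]
          rintro (h | h)
          · exact hnm q (List.mem_cons_of_mem _ hq) h
          · exact hpt q hq h)]
      simp [pvM, pvN, hM]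

theorem pvM_sublist (residues : List (Int × String)) :
    List.Sublist (pvM residues) (residues.map (fun p => p.1)) :=
  List.Sublist.map _ List.filter_sublist

theorem pvN_sublist (residues : List (Int × String)) :
    List.Sublist (pvN residues) (residues.map (fun p => p.1)) :=
  List.Sublist.map _ List.filter_sublist

theorem pvM_append (l₁ l₂ : List (Int × String)) :
    pvM (l₁ ++ l₂) = pvM l₁ ++ pvM l₂ := by
  simp [pvM, List.filter_append]

theorem pvN_append (l₁ l₂ : List (Int × String)) :
    pvN (l₁ ++ l₂) = pvN l₁ ++ pvN l₂ := by
  simp [pvN, List.filter_append]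

theorem pv_union_eq_update (s t : List Int) :
    PySem.Set.union s t = PySem.Set.update s t := rfl

-- B's divide-and-conquer recursion computes the same in-order partition.
theorem pvGo_eq : ∀ (l : List (Int × String)),
    (l.map (fun p => p.1)).Nodup → pvGo l = (pvM l, pvN l) := by
  intro l
  induction l using pvGo.induct with
  | case1 =>
    intro _
    simp [pvGo, pvM, pvN, PySem.Set.empty]
  | case2 p hM =>
    intro _
    simp [pvGo, pvM, pvN, hM, PySem.Set.empty, PySem.Set.ofList, PySem.Set.add]
  | case3 p hM =>
    intro _
    simp [pvGo, pvM, pvN, hM, PySem.Set.empty, PySem.Set.ofList, PySem.Set.add]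
  | case4 p q t ih1 ih2 =>
    intro hk
    have htd := List.take_append_drop ((p :: q :: t).length / 2) (p :: q :: t)
    have hk' : (((p :: q :: t).take ((p :: q :: t).length / 2)).map (fun p => p.1)
        ++ ((p :: q :: t).drop ((p :: q :: t).length / 2)).map (fun p => p.1)).Nodup := by
      rw [← List.map_append, htd]; exact hk
    rw [List.nodup_append] at hk'
    obtain ⟨hk1, hk2, hdisj⟩ := hk'
    have e1 := ih1 hk1
    have e2 := ih2 hk2
    have hMnd : (pvM ((p :: q :: t).drop ((p :: q :: t).length / 2))).Nodup :=
      hk2.sublist (pvM_sublist _)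
    have hNnd : (pvN ((p :: q :: t).drop ((p :: q :: t).length / 2))).Nodup :=
      hk2.sublist (pvN_sublist _)
    have hMdj : ∀ x ∈ pvM ((p :: q :: t).drop ((p :: q :: t).length / 2)),
        x ∉ pvM ((p :: q :: t).take ((p :: q :: t).length / 2)) := by
      intro x hx2 hx1
      exact hdisj _ ((pvM_sublist _).mem hx1) _ ((pvM_sublist _).mem hx2) rfl
    have hNdj : ∀ x ∈ pvN ((p :: q :: t).drop ((p :: q :: t).length / 2)),
        x ∉ pvN ((p :: q :: t).take ((p :: q :: t).length / 2)) := by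
      intro x hx2 hx1
      exact hdisj _ ((pvN_sublist _).mem hx1) _ ((pvN_sublist _).mem hx2) rfl
    rw [pvGo, e1, e2]
    simp only [pv_union_eq_update]
    rw [PySem.Set.update_eq_append_of_disjoint _ _ hMnd hMdj,
        PySem.Set.update_eq_append_of_disjoint _ _ hNnd hNdj,
        ← pvM_append, ← pvN_append, htd]

-- ===== VERDICT (by name: the statement is the Claim_ definition above) =====
theorem split_residue_indices_methionine_py_spec : Claim_equal_split_residue_indices_methionine_py := by
  intro residues _ hpre
  unfold Spec_split_residue_indices_methionine_py
  unfold split_residue_indices_methionine_py split_residue_indices_methionine_py_alt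
  rw [foldA_eq residues PySem.Set.empty PySem.Set.empty hpre
    (by simp [PySem.Set.empty]) (by simp [PySem.Set.empty])]
  rw [pvGo_eq residues hpre]
  simp [PySem.Set.empty]
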